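-- pv_equiv track=rewrite | github.com/coding-xyz/huayi-providers | utils.py | finite_connected_map
-- ===== SOURCE A (Python) =====
-- def finite_connected_map(n_qubits, radius):
--     if radius <= n_qubits:
--         coupling_map = [[i,j]
--                         for i in range(n_qubits)
--                         for j in list(range(max(0,i-radius),i)) +
--                         list(range(i+1,min(i+1+radius,n_qubits)))]
--     else:
--         coupling_map = [[i,j]
--                         for i in range(n_qubits)
--                         for j in list(range(i))+list(range(i+1,n_qubits))]
--     return coupling_map
-- ===== SOURCE B (Python) =====
-- def finite_connected_map(n_qubits, radius):
--     # Distance-major generation: for each separation d, emit both directions of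
--     # every edge at that distance, then sort the edge list into (i, j) order.
--     edges = []
--     for d in range(1, n_qubits):
--         if d <= radius:
--             for i in range(n_qubits - d):
--                 edges.append((i, i + d))
--                 edges.append((i + d, i))
--     edges.sort()
--     return [[i, j] for i, j in edges]
-- ===== Notes on version B (the rewrite author's own statement) =====
-- stated objective: alternative
-- what changed: B enumerates edges distance-major (for each separation d it emits both directions of every edge at distance d) and then sorts the edge list lexicographically, instead of A's qubit-major comprehension that splices two range segments per qubit under a radius<=n_qubits case split.
import Mathlib
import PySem

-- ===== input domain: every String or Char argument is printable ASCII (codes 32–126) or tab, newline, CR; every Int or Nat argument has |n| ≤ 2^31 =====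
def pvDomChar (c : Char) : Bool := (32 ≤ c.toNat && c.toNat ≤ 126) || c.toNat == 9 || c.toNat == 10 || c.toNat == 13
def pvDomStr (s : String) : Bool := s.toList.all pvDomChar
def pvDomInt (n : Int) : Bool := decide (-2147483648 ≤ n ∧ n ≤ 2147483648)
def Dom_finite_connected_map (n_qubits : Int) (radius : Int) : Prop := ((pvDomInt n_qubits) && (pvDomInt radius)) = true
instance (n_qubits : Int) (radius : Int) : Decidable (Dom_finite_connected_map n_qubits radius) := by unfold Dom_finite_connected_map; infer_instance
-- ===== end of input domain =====

-- B generates the edges distance-major (both directions of every edge at each separation d)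
-- and then sorts them into (i, j) order, instead of A's qubit-major two-branch comprehension
-- (objective: alternative).

-- ===== PORT A =====
def finite_connected_map (n_qubits : Int) (radius : Int) : List (List Int) :=
  if radius ≤ n_qubits then
    (PySem.List.pyRange 0 n_qubits 1).flatMap (fun i =>
      ((PySem.List.pyRange (max 0 (i - radius)) i 1) ++
       (PySem.List.pyRange (i + 1) (min (i + 1 + radius) n_qubits) 1)).map (fun j => [i, j]))
  else
    (PySem.List.pyRange 0 n_qubits 1).flatMap (fun i =>
      ((PySem.List.pyRange 0 i 1) ++
       (PySem.List.pyRange (i + 1) n_qubits 1)).map (fun j => [i, j]))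

-- ===== PORT B =====
def finite_connected_map_alt (n_qubits : Int) (radius : Int) : List (List Int) :=
  let edges : List (Int × Int) :=
    (PySem.List.pyRange 1 n_qubits 1).foldl (fun acc d =>
      if d ≤ radius then
        (PySem.List.pyRange 0 (n_qubits - d) 1).foldl
          (fun a i => a ++ [(i, i + d), (i + d, i)]) acc
      else acc) []
  -- edges.sort(): Python's stable ascending sort of int pairs in lexicographic tuple order,
  -- ported as the stable List.mergeSort with that comparison
  (edges.mergeSort (fun a b =>
    decide (a.1 < b.1) || (a.1 == b.1 && decide (a.2 ≤ b.2)))).map (fun e => [e.1, e.2])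

-- ===== PRECONDITION & SPEC =====
def Spec_finite_connected_map (n_qubits : Int) (radius : Int) (out : List (List Int)) : Prop := out = finite_connected_map_alt n_qubits radius
instance (n_qubits : Int) (radius : Int) (out : List (List Int)) : Decidable (Spec_finite_connected_map n_qubits radius out) := by unfold Spec_finite_connected_map; infer_instance

-- ===== CLAIM (what is proved, stated in full; the proofs are below) =====
def Claim_equal_finite_connected_map : Prop := ∀ (n_qubits : Int) (radius : Int), Dom_finite_connected_map n_qubits radius → Spec_finite_connected_map n_qubits radius (finite_connected_map n_qubits radius)

-- ===== LEMMAS AND PROOFS =====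

-- the set of coupling pairs both programs produce
def pvP (n r x y : Int) : Prop :=
  0 ≤ x ∧ x < n ∧ 0 ≤ y ∧ y < n ∧ x ≠ y ∧ x - y ≤ r ∧ y - x ≤ r

-- A's output as a list of pairs
def pvApairs (n r : Int) : List (Int × Int) :=
  if r ≤ n then
    (PySem.List.pyRange 0 n 1).flatMap (fun i =>
      ((PySem.List.pyRange (max 0 (i - r)) i 1) ++
       (PySem.List.pyRange (i + 1) (min (i + 1 + r) n) 1)).map (fun j => (i, j)))
  else
    (PySem.List.pyRange 0 n 1).flatMap (fun i =>
      ((PySem.List.pyRange 0 i 1) ++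
       (PySem.List.pyRange (i + 1) n 1)).map (fun j => (i, j)))

-- B's unsorted edge list, block of separation d, and the whole list
def pvBlock (n d : Int) : List (Int × Int) :=
  (PySem.List.pyRange 0 (n - d) 1).flatMap (fun i => [(i, i + d), (i + d, i)])

def pvElist (n r : Int) : List (Int × Int) :=
  ((PySem.List.pyRange 1 n 1).filter (fun d => decide (d ≤ r))).flatMap (pvBlock n)

theorem pv_pairwise_lt_pyRange (a b : Int) :
    List.Pairwise (· < ·) (PySem.List.pyRange a b 1) := by
  rw [PySem.List.pyRange_of_pos a b (by norm_num : (0:ℤ) < 1)]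
  rw [List.pairwise_map]
  exact (List.pairwise_lt_range).imp (fun h => by omega)

theorem pv_A_eq (n r : Int) :
    finite_connected_map n r = (pvApairs n r).map (fun e => [e.1, e.2]) := by
  unfold finite_connected_map pvApairs
  split_ifs <;> simp [List.map_flatMap, List.map_map, Function.comp_def]

-- the lexicographic comparison B sorts with
def pvLe (a b : Int × Int) : Bool :=
  decide (a.1 < b.1) || (a.1 == b.1 && decide (a.2 ≤ b.2))

theorem pv_alt_eq (n r : Int) :
    finite_connected_map_alt n r =
      ((pvElist n r).mergeSort pvLe).map (fun e => [e.1, e.2]) := by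
  unfold finite_connected_map_alt
  have h1 : (PySem.List.pyRange 1 n 1).foldl (fun acc d =>
      if d ≤ r then
        (PySem.List.pyRange 0 (n - d) 1).foldl
          (fun a i => a ++ [(i, i + d), (i + d, i)]) acc
      else acc) [] = pvElist n r := by
    have h2 : ∀ acc d, d ∈ PySem.List.pyRange 1 n 1 →
        (if d ≤ r then
          (PySem.List.pyRange 0 (n - d) 1).foldl
            (fun a i => a ++ [(i, i + d), (i + d, i)]) acc
        else acc) = (if d ≤ r then acc ++ pvBlock n d else acc) := by
      intro acc d _
      by_cases hd : d ≤ r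
      · simp only [hd, if_pos]
        exact PySem.List.foldl_append_eq_flatMap (fun i => [(i, i + d), (i + d, i)]) _ acc
      · simp [hd]
    rw [PySem.List.foldl_congr_mem _ _ _ _ h2,
        PySem.List.foldl_ite_eq_foldl_filter (fun d => d ≤ r)
          (fun acc d => acc ++ pvBlock n d),
        PySem.List.foldl_append_eq_flatMap]
    simp [pvElist]
  rw [h1]
  rfl

theorem pv_mem_block (n d x y : Int) (hd : 1 ≤ d) :
    (x, y) ∈ pvBlock n d ↔
      (0 ≤ x ∧ x < n ∧ 0 ≤ y ∧ y < n ∧ (y - x = d ∨ x - y = d)) := by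
  unfold pvBlock
  simp only [List.mem_flatMap, PySem.List.mem_pyRange_one, List.mem_cons,
    List.not_mem_nil, or_false, Prod.mk.injEq]
  constructor
  · rintro ⟨i, ⟨h0, h1⟩, ⟨hx, hy⟩ | ⟨hx, hy⟩⟩ <;> omega
  · rintro ⟨hx0, hxn, hy0, hyn, h | h⟩
    · exact ⟨x, by omega, Or.inl ⟨rfl, by omega⟩⟩
    · exact ⟨y, by omega, Or.inr ⟨by omega, rfl⟩⟩

theorem pv_mem_elist (n r x y : Int) : (x, y) ∈ pvElist n r ↔ pvP n r x y := by
  unfold pvElist pvP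
  simp only [List.mem_flatMap, List.mem_filter, PySem.List.mem_pyRange_one,
    decide_eq_true_eq]
  constructor
  · rintro ⟨d, ⟨⟨h1, h2⟩, h3⟩, hm⟩
    rw [pv_mem_block n d x y h1] at hm
    omega
  · rintro ⟨hx0, hxn, hy0, hyn, hne, h1, h2⟩
    by_cases hxy : x < y
    · exact ⟨y - x, ⟨⟨by omega, by omega⟩, by omega⟩,
        (pv_mem_block n (y - x) x y (by omega)).2 (by omega)⟩
    · exact ⟨x - y, ⟨⟨by omega, by omega⟩, by omega⟩,
        (pv_mem_block n (x - y) x y (by omega)).2 (by omega)⟩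

theorem pv_mem_apairs (n r x y : Int) : (x, y) ∈ pvApairs n r ↔ pvP n r x y := by
  unfold pvApairs pvP
  split_ifs with h <;>
    simp only [List.mem_flatMap, List.mem_map, List.mem_append,
      PySem.List.mem_pyRange_one, Prod.mk.injEq] <;>
    constructor
  · rintro ⟨i, ⟨h0, h1⟩, j, hj, hx, hy⟩
    rcases hj with ⟨h2, h3⟩ | ⟨h2, h3⟩ <;> simp only [max_le_iff,
      lt_min_iff] at * <;> omega
  · rintro ⟨hx0, hxn, hy0, hyn, hne, h1, h2⟩
    refine ⟨x, ⟨hx0, hxn⟩, y, ?_, rfl, rfl⟩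
    by_cases hxy : y < x
    · left; constructor
      · simp only [max_le_iff]; omega
      · omega
    · right; constructor
      · omega
      · simp only [lt_min_iff]; omega
  · rintro ⟨i, ⟨h0, h1⟩, j, hj, hx, hy⟩
    rcases hj with ⟨h2, h3⟩ | ⟨h2, h3⟩ <;> omega
  · rintro ⟨hx0, hxn, hy0, hyn, hne, h1, h2⟩
    exact ⟨x, ⟨hx0, hxn⟩, y, by omega, rfl, rfl⟩

theorem pv_nodup_block (n d : Int) (hd : 1 ≤ d) : (pvBlock n d).Nodup := by
  unfold pvBlock
  rw [List.nodup_flatMap]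
  constructor
  · intro i _
    simp only [List.nodup_cons, List.mem_cons, List.not_mem_nil, or_false,
      Prod.mk.injEq, List.nodup_nil, and_true, not_and]
    exact ⟨fun h => by omega, fun h => h⟩
  · refine (pv_pairwise_lt_pyRange 0 (n - d)).imp ?_
    intro i j hij p hp hq
    simp only [List.mem_cons, List.not_mem_nil, or_false] at hp hq
    rcases hp with rfl | rfl <;> rcases hq with h | h <;>
      simp only [Prod.mk.injEq] at h <;> omega

theorem pv_nodup_elist (n r : Int) : (pvElist n r).Nodup := by
  unfold pvElist
  rw [List.nodup_flatMap]
  constructor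
  · intro d hd
    simp only [List.mem_filter, PySem.List.mem_pyRange_one] at hd
    exact pv_nodup_block n d (by omega)
  · have hp : List.Pairwise (· < ·) ((PySem.List.pyRange 1 n 1).filter
        (fun d => decide (d ≤ r))) := (pv_pairwise_lt_pyRange 1 n).filter _
    refine List.Pairwise.imp_of_mem ?_ hp
    intro d d' hd hd' hlt
    simp only [List.mem_filter, PySem.List.mem_pyRange_one] at hd hd'
    intro p hp' hq
    rcases p with ⟨x, y⟩
    rw [pv_mem_block n d x y (by omega)] at hp'
    rw [pv_mem_block n d' x y (by omega)] at hq
    omega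

-- the lexicographic relation A's order realises
theorem pv_pairwise_apairs (n r : Int) :
    List.Pairwise (fun a b : Int × Int =>
      (toLex a : Lex (Int × Int)) < toLex b) (pvApairs n r) := by
  have key : ∀ a b : Int × Int,
      (a.1 < b.1 ∨ (a.1 = b.1 ∧ a.2 < b.2)) →
      (toLex a : Lex (Int × Int)) < toLex b := by
    intro a b h; exact Prod.Lex.lt_iff.2 h
  unfold pvApairs
  split_ifs with h <;> rw [List.pairwise_flatMap] <;> constructor
  · intro i _
    rw [List.pairwise_map]
    refine List.Pairwise.imp (R := fun a b => a < b)
      (S := fun a b => (toLex (i, a) : Lex (Int × Int)) < toLex (i, b))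
      (fun hlt => key _ _ (Or.inr ⟨rfl, hlt⟩)) ?_
    rw [List.pairwise_append]
    refine ⟨pv_pairwise_lt_pyRange _ _, pv_pairwise_lt_pyRange _ _, ?_⟩
    intro a ha b hb
    rw [PySem.List.mem_pyRange_one] at ha hb
    omega
  · refine (pv_pairwise_lt_pyRange 0 n).imp ?_
    intro i i' hii p hp q hq
    simp only [List.mem_map] at hp hq
    obtain ⟨j, _, rfl⟩ := hp
    obtain ⟨j', _, rfl⟩ := hq
    exact key _ _ (Or.inl hii)
  · intro i _
    rw [List.pairwise_map]
    refine List.Pairwise.imp (R := fun a b => a < b)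
      (S := fun a b => (toLex (i, a) : Lex (Int × Int)) < toLex (i, b))
      (fun hlt => key _ _ (Or.inr ⟨rfl, hlt⟩)) ?_
    rw [List.pairwise_append]
    refine ⟨pv_pairwise_lt_pyRange _ _, pv_pairwise_lt_pyRange _ _, ?_⟩
    intro a ha b hb
    rw [PySem.List.mem_pyRange_one] at ha hb
    omega
  · refine (pv_pairwise_lt_pyRange 0 n).imp ?_
    intro i i' hii p hp q hq
    simp only [List.mem_map] at hp hq
    obtain ⟨j, _, rfl⟩ := hp
    obtain ⟨j', _, rfl⟩ := hq
    exact key _ _ (Or.inl hii)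

theorem pv_nodup_apairs (n r : Int) : (pvApairs n r).Nodup := by
  refine (pv_pairwise_apairs n r).imp ?_
  intro a b hab h; subst h; exact lt_irrefl _ hab

theorem pv_perm (n r : Int) : (pvApairs n r).Perm (pvElist n r) := by
  refine List.perm_of_nodup_nodup_toFinset_eq (pv_nodup_apairs n r)
    (pv_nodup_elist n r) ?_
  ext ⟨x, y⟩
  simp only [List.mem_toFinset]
  rw [pv_mem_apairs, pv_mem_elist]

theorem pv_mergeSort_eq (n r : Int) :
    (pvElist n r).mergeSort pvLe = pvApairs n r := by
  have hperm : ((pvElist n r).mergeSort pvLe).Perm (pvApairs n r) :=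
    (List.mergeSort_perm _ _).trans (pv_perm n r).symm
  have hpw1 : List.Pairwise (fun a b => pvLe a b = true)
      ((pvElist n r).mergeSort pvLe) := by
    refine List.pairwise_mergeSort ?_ ?_ _
    · intro a b c hab hbc
      simp only [pvLe, Bool.or_eq_true, Bool.and_eq_true, decide_eq_true_eq,
        beq_iff_eq] at *
      omega
    · intro a b
      simp only [pvLe, Bool.or_eq_true, Bool.and_eq_true, decide_eq_true_eq,
        beq_iff_eq]
      omega
  have hpw2 : List.Pairwise (fun a b => pvLe a b = true) (pvApairs n r) := by
    refine (pv_pairwise_apairs n r).imp ?_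
    intro a b hab
    rw [Prod.Lex.lt_iff] at hab
    simp only [pvLe, Bool.or_eq_true, Bool.and_eq_true, decide_eq_true_eq,
      beq_iff_eq]
    simp only [ofLex_toLex] at hab
    omega
  refine List.Perm.eq_of_pairwise ?_ hpw1 hpw2 hperm
  intro a b _ _ hab hba
  simp only [pvLe, Bool.or_eq_true, Bool.and_eq_true, decide_eq_true_eq,
    beq_iff_eq] at hab hba
  rcases a with ⟨a1, a2⟩; rcases b with ⟨b1, b2⟩
  simp only [Prod.mk.injEq]
  constructor <;> omega

-- ===== VERDICT (by name: the statement is the Claim_ definition above) =====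
theorem finite_connected_map_spec : Claim_equal_finite_connected_map := by
  intro n r _
  unfold Spec_finite_connected_map
  rw [pv_A_eq, pv_alt_eq, pv_mergeSort_eq]
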